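-- pv_equiv track=rewrite | github.com/Hofmann-K/16-Byte-AES-Encoder-and-Decoder | main.py | Xtime
-- ===== SOURCE A (Python) =====
-- def Xtime(a, b):
--     # Perform the Xtime operation (xtime) as specified in AES
--     result = 0
--     for _ in range(8):
--         if b & 0x01:
--             result ^= a
--         high_bit_set = a & 0x80
--         a <<= 1
--         if high_bit_set:
--             a ^= 0x1B  # XOR with 0x1B if high bit was set
--         b >>= 1
--     return result & 0xFF
-- ===== SOURCE B (Python) =====
-- # GF(2^8) multiplication via precomputed log/antilog tables (generator 0x03)
-- # instead of the 8-step shift-and-xor loop.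
--
-- _EXP = []
-- _LOG = [0] * 256
-- _p = 1
-- for _i in range(255):
--     _EXP.append(_p)
--     _LOG[_p] = _i
--     _p ^= ((_p << 1) ^ (0x1B if _p & 0x80 else 0)) & 0xFF
--
-- def Xtime(a, b):
--     am = a & 0xFF
--     bm = b & 0xFF
--     if am == 0 or bm == 0:
--         return 0
--     return _EXP[(_LOG[am] + _LOG[bm]) % 255]
-- ===== Notes on version B (the rewrite author's own statement) =====
-- stated objective: alternative
-- what changed: Replaces the 8-iteration shift-and-xor GF(2^8) multiply loop by lookups into GF(2^8) log/antilog tables (generator 0x03) precomputed once at module load.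
import Mathlib
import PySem

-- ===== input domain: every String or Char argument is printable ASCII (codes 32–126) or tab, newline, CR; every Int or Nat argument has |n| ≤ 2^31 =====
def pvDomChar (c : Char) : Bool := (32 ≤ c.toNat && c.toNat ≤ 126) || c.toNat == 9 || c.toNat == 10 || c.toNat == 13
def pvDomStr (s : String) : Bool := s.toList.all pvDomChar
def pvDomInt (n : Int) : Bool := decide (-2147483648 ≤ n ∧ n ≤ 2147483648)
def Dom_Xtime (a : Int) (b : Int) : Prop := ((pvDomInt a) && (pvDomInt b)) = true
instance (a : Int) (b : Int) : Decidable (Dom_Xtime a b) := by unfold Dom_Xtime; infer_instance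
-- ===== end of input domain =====

-- B replaces A's 8-iteration shift-and-xor GF(2^8) multiply loop by O(1) lookups into
-- log/antilog tables (generator 0x03) built once; equal on all int inputs (A is total).

-- ===== PORT A =====
def Xtime (a : Int) (b : Int) : Int :=
  let s := (List.range 8).foldl
    (fun (s : Int × Int × Int) _ =>
      let result := s.1
      let a := s.2.1
      let b := s.2.2
      let result := if PySem.Int.band b 1 ≠ 0 then PySem.Int.bxor result a else result
      let high_bit_set := PySem.Int.band a 128
      let a := a <<< (1:Nat)
      let a := if high_bit_set ≠ 0 then PySem.Int.bxor a 27 else a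
      (result, a, b >>> (1:Nat)))
    (0, a, b)
  PySem.Int.band s.1 255

-- ===== PORT B =====
-- Source B builds _EXP/_LOG once at module level; here that one-time construction is gfTables.
def gfTables : List Int × List Int :=
  let s := (List.range 255).foldl
    (fun (s : List Int × List Int × Int) i =>
      let exp := s.1
      let log := s.2.1
      let p := s.2.2
      (exp ++ [p], log.set p.toNat (i : Int),
       PySem.Int.bxor p (PySem.Int.band
         (PySem.Int.bxor (p <<< (1:Nat)) (if PySem.Int.band p 128 ≠ 0 then 27 else 0)) 255)))
    ([], List.replicate 256 0, 1)
  (s.1, s.2.1)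

def Xtime_alt (a : Int) (b : Int) : Int :=
  let am := PySem.Int.band a 255
  let bm := PySem.Int.band b 255
  if am = 0 ∨ bm = 0 then 0
  else PySem.List.pyGetD gfTables.1
        (PySem.Int.mod (PySem.List.pyGetD gfTables.2 am 0 + PySem.List.pyGetD gfTables.2 bm 0) 255) 0

-- ===== PRECONDITION & SPEC =====
def Spec_Xtime (a : Int) (b : Int) (out : Int) : Prop := out = Xtime_alt a b
instance (a : Int) (b : Int) (out : Int) : Decidable (Spec_Xtime a b out) := by unfold Spec_Xtime; infer_instance

-- ===== CLAIM (what is proved, stated in full; the proofs are below) =====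
def Claim_equal_Xtime : Prop := ∀ (a : Int) (b : Int), Dom_Xtime a b → Spec_Xtime a b (Xtime a b)

-- ===== LEMMAS AND PROOFS =====

def byte (x : Int) : Nat := (x % 256).toNat

lemma byte_lt (x : Int) : byte x < 256 := by unfold byte; omega

lemma and255 (m : Nat) : m &&& 255 = m % 256 := by
  have := Nat.and_two_pow_sub_one_eq_mod m 8
  norm_num at this
  exact this

lemma band255 (x : Int) : PySem.Int.band x 255 = ((byte x : Nat) : Int) := by
  unfold PySem.Int.band byte
  by_cases h1 : (0:Int) ≤ x
  · rw [if_pos h1, if_pos (by norm_num : (0:Int) ≤ 255)]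
    simp only [show Int.toNat 255 = 255 from rfl, and255]
    omega
  · rw [if_neg h1, if_pos (by norm_num : (0:Int) ≤ 255)]
    simp only [show Int.toNat 255 = 255 from rfl, Nat.and_comm 255, and255]
    omega

lemma and128_mod (m : Nat) : m &&& 128 = (m % 256) &&& 128 := by
  have h : (255:Nat) &&& 128 = 128 := rfl
  rw [← and255 m, Nat.and_assoc, h]

set_option maxRecDepth 4000 in
lemma sub_and128 : ∀ s : Fin 256, (255 - s.val) &&& 128 = 128 - (s.val &&& 128) := by decide

lemma band128 (x : Int) : PySem.Int.band x 128 = ((byte x &&& 128 : Nat) : Int) := by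
  unfold PySem.Int.band byte
  by_cases h1 : (0:Int) ≤ x
  · rw [if_pos h1, if_pos (by norm_num : (0:Int) ≤ 128)]
    simp only [show Int.toNat 128 = 128 from rfl]
    rw [and128_mod]
    congr 2
    omega
  · rw [if_neg h1, if_pos (by norm_num : (0:Int) ≤ 128)]
    simp only [show Int.toNat 128 = 128 from rfl]
    rw [Nat.and_comm 128, and128_mod ((-x-1).toNat)]
    have h : (x % 256).toNat = 255 - ((-x-1).toNat % 256) := by omega
    have h2 := sub_and128 ⟨(-x-1).toNat % 256, Nat.mod_lt _ (by norm_num)⟩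
    simp only [] at h2
    have hle : (-x-1).toNat % 256 &&& 128 ≤ 128 := Nat.and_le_right
    rw [h]
    omega

set_option maxRecDepth 4000 in
lemma compl_xor255 : ∀ s : Fin 256, 255 - s.val = s.val ^^^ 255 := by decide

lemma c255 (s : Nat) (h : s < 256) : 255 - s = s ^^^ 255 := compl_xor255 ⟨s, h⟩

lemma xor_mod256 (u v : Nat) : (u ^^^ v) % 256 = (u % 256) ^^^ (v % 256) := by
  have := Nat.xor_mod_two_pow (a := u) (b := v) (n := 8)
  norm_num at this
  exact this

lemma xor_lt256 (u v : Nat) (hu : u < 256) (hv : v < 256) : u ^^^ v < 256 :=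
  Nat.xor_lt_two_pow (n := 8) hu hv

lemma byte_neg_repr (z : Nat) : byte (-(z:Int) - 1) = 255 - z % 256 := by
  unfold byte; omega

lemma byte_bxor (x y : Int) : byte (PySem.Int.bxor x y) = byte x ^^^ byte y := by
  unfold PySem.Int.bxor
  split_ifs with h1 h2 h3
  · have : byte ((( x.toNat ^^^ y.toNat : Nat)) : Int) = (x.toNat ^^^ y.toNat) % 256 := by
      unfold byte; omega
    rw [this, xor_mod256]
    congr 1 <;> unfold byte <;> omega
  · -- x ≥ 0, y < 0
    have : (-((x.toNat ^^^ (-y - 1).toNat : Nat) : Int) - 1) = -(((x.toNat ^^^ (-y - 1).toNat : Nat)) : Int) - 1 := rfl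
    rw [this, byte_neg_repr, xor_mod256]
    have hx : byte x = x.toNat % 256 := by unfold byte; omega
    have hy : byte y = 255 - ((-y-1).toNat % 256) := by unfold byte; omega
    rw [hx, hy,
        c255 _ (Nat.mod_lt _ (by norm_num)),
        c255 _ (xor_lt256 _ _ (Nat.mod_lt _ (by norm_num)) (Nat.mod_lt _ (by norm_num)))]
    rw [Nat.xor_assoc]
  · -- x < 0, y ≥ 0
    rw [byte_neg_repr, xor_mod256]
    have hx : byte x = 255 - ((-x-1).toNat % 256) := by unfold byte; omega
    have hy : byte y = y.toNat % 256 := by unfold byte; omega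
    rw [hx, hy,
        c255 _ (Nat.mod_lt _ (by norm_num)),
        c255 _ (xor_lt256 _ _ (Nat.mod_lt _ (by norm_num)) (Nat.mod_lt _ (by norm_num)))]
    rw [Nat.xor_comm _ 255, Nat.xor_comm _ 255, ← Nat.xor_assoc]
  · -- both neg
    have : byte (((((-x - 1).toNat ^^^ (-y - 1).toNat : Nat)) : Int)) = ((-x - 1).toNat ^^^ (-y - 1).toNat) % 256 := by
      unfold byte; omega
    rw [this, xor_mod256]
    have hx : byte x = 255 - ((-x-1).toNat % 256) := by unfold byte; omega
    have hy : byte y = 255 - ((-y-1).toNat % 256) := by unfold byte; omega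
    rw [hx, hy,
        c255 _ (Nat.mod_lt _ (by norm_num)),
        c255 _ (Nat.mod_lt _ (by norm_num))]
    rw [Nat.xor_assoc, ← Nat.xor_assoc 255 _ 255, Nat.xor_comm 255 _, Nat.xor_assoc _ 255 255,
        Nat.xor_self, Nat.xor_zero]

lemma byte_shl (x : Int) : byte (x <<< (1:Nat)) = 2 * byte x % 256 := by
  rw [Int.shiftLeft_eq]
  unfold byte
  norm_num
  omega

lemma band1_iff (x : Int) (n : Nat) :
    (PySem.Int.band x 1 ≠ 0) ↔ ((x % ((2:Int)^(n+1))).toNat &&& 1 ≠ 0) := by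
  rw [PySem.Int.band_one, PySem.Int.mod_eq_emod_of_pos (by norm_num : (0:Int) < 2)]
  have hdvd : (2:Int) ∣ (2:Int)^(n+1) := dvd_pow_self 2 (Nat.succ_ne_zero n)
  have hpos : (0:Int) < (2:Int)^(n+1) := by positivity
  have h1 : x % 2 = (x % ((2:Int)^(n+1))) % 2 := (Int.emod_emod_of_dvd x hdvd).symm
  have h2 : 0 ≤ x % ((2:Int)^(n+1)) := Int.emod_nonneg x (by omega)
  rw [Nat.and_one_is_mod]
  omega

lemma shr_residue (x : Int) (n : Nat) :
    ((x >>> (1:Nat)) % ((2:Int)^n)).toNat = (x % ((2:Int)^(n+1))).toNat >>> 1 := by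
  rw [Int.shiftRight_eq_div_pow, Nat.shiftRight_succ, Nat.shiftRight_zero]
  norm_num
  have hpos : (0:Int) < (2:Int)^n := by positivity
  set M : Int := (2:Int)^n with hM
  have h2M : (2:Int)^(n+1) = 2 * M := by rw [pow_succ]; ring
  rw [h2M]
  set s : Int := x % (2 * M) with hs
  have hsnn : 0 ≤ s := Int.emod_nonneg x (by omega)
  have hslt : s < 2 * M := Int.emod_lt_of_pos x (by omega)
  have hq : ∃ q, x = s + q * (2 * M) :=
    ⟨x / (2 * M), by rw [hs, mul_comm (x / (2 * M)) (2 * M)]; exact (Int.emod_add_mul_ediv x (2 * M)).symm⟩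
  obtain ⟨q, hx⟩ := hq
  have hdiv : x / 2 = s / 2 + q * M := by
    rw [hx, show s + q * (2 * M) = s + (q * M) * 2 by ring, Int.add_mul_ediv_right _ _ (by norm_num)]
  rw [hdiv, mul_comm q M, Int.add_mul_emod_self_left]
  have h1 : 0 ≤ s / 2 := by positivity
  have h2 : s / 2 < M := by omega
  rw [Int.emod_eq_of_lt h1 h2]
  omega

def natLoop : Nat → Nat → Nat → Nat → Nat
  | 0, r, _, _ => r
  | n+1, r, a, b =>
      natLoop n (r ^^^ a * (b &&& 1)) (2 * a % 256 ^^^ 27 * (a >>> 7 &&& 1)) (b >>> 1)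

def natR (x y : Nat) : Nat := natLoop 8 0 x y

def intStep (s : Int × Int × Int) : Int × Int × Int :=
  (if PySem.Int.band s.2.2 1 ≠ 0 then PySem.Int.bxor s.1 s.2.1 else s.1,
   if PySem.Int.band s.2.1 128 ≠ 0 then PySem.Int.bxor (s.2.1 <<< (1:Nat)) 27 else s.2.1 <<< (1:Nat),
   s.2.2 >>> (1:Nat))

def intLoop : Nat → Int × Int × Int → Int × Int × Int
  | 0, s => s
  | n+1, s => intLoop n (intStep s)

lemma byte27 : byte (27:Int) = 27 := by unfold byte; decide

set_option maxRecDepth 4000 in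
lemma hi_bit : ∀ m : Fin 256, (m.val >>> 7 &&& 1) = (m.val &&& 128) / 128 := by decide

set_option maxRecDepth 4000 in
lemma and128_cases : ∀ m : Fin 256, m.val &&& 128 = 0 ∨ m.val &&& 128 = 128 := by decide

lemma step_r (n : Nat) (r a b : Int) :
    byte (intStep (r, a, b)).1 = byte r ^^^ byte a * ((b % ((2:Int)^(n+1))).toNat &&& 1) := by
  show byte (if PySem.Int.band b 1 ≠ 0 then PySem.Int.bxor r a else r) = _
  have hb01 : (b % ((2:Int)^(n+1))).toNat &&& 1 = 0 ∨ (b % ((2:Int)^(n+1))).toNat &&& 1 = 1 := by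
    rw [Nat.and_one_is_mod]; omega
  by_cases hc : PySem.Int.band b 1 ≠ 0
  · have h1 : (b % ((2:Int)^(n+1))).toNat &&& 1 = 1 := by
      rcases hb01 with h | h
      · exact absurd h ((band1_iff b n).mp hc)
      · exact h
    rw [if_pos hc, h1, Nat.mul_one]
    exact byte_bxor r a
  · have h0 : (b % ((2:Int)^(n+1))).toNat &&& 1 = 0 := by
      by_contra h
      exact hc ((band1_iff b n).mpr h)
    rw [if_neg hc, h0, Nat.mul_zero, Nat.xor_zero]

lemma step_a (r a b : Int) :
    byte (intStep (r, a, b)).2.1 = 2 * byte a % 256 ^^^ 27 * (byte a >>> 7 &&& 1) := by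
  show byte (if PySem.Int.band a 128 ≠ 0 then PySem.Int.bxor (a <<< (1:Nat)) 27 else a <<< (1:Nat)) = _
  have hcase := and128_cases ⟨byte a, byte_lt a⟩
  have hhi := hi_bit ⟨byte a, byte_lt a⟩
  simp only [] at hcase hhi
  by_cases hc : PySem.Int.band a 128 ≠ 0
  · have h128 : byte a &&& 128 = 128 := by
      rcases hcase with h | h
      · exfalso; apply hc; rw [band128, h]; rfl
      · exact h
    rw [if_pos hc, byte_bxor, byte_shl, byte27, hhi, h128]
  · have h0 : byte a &&& 128 = 0 := by
      rcases hcase with h | h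
      · exact h
      · exfalso
        apply hc
        rw [band128, h]
        intro hh
        exact absurd (by exact_mod_cast hh) (by norm_num)
    rw [if_neg hc, byte_shl, hhi, h0]
    norm_num

lemma loop_rel (n : Nat) (r a b : Int) :
    byte (intLoop n (r, a, b)).1
      = natLoop n (byte r) (byte a) (b % ((2:Int)^n)).toNat := by
  induction n generalizing r a b with
  | zero => simp [intLoop, natLoop]
  | succ n ih =>
    show byte (intLoop n (intStep (r, a, b))).1 = _
    have hstep : intLoop n (intStep (r, a, b))
        = intLoop n ((intStep (r, a, b)).1, (intStep (r, a, b)).2.1, (intStep (r, a, b)).2.2) := rfl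
    rw [hstep, ih, step_r n r a b, step_a r a b,
        show (intStep (r,a,b)).2.2 = b >>> (1:Nat) from rfl, shr_residue b n]
    rfl

def EXPN : Nat := 121466575815500734415996836054882879791832871126464106601702187317037704638720699736399773789881350966450612456712855012027411276600174289287471020404625812305602624065235109912861702064162581238381248958448422203687095403783548669481020115429473714815130546491650907227391014769411226625179674495964331439187933946584331397333639979447433688574122779091165484305754955373075414835846686739481168846087332879005575464100018941681806164995707250399423063311368515928344698269234575261926727907427524598329539937222090466892085999338983806607642276495436692919915470849325341672618663070658392065151738926641076044545
def LOGN : Nat := 939374623831894136699086600277250597547650664638770418422125146541797353646788332867483593573384618611044815625336497665827114626705134492515730415652478061620339993830966980270842846318821775850471098591710629241171812800746666233448222972174585295916389942636813666312872914849454985560152530477328703759683306625234997237483834721220409437442253146756845415190424543171129629468776480674528486868811725071010351012234056630775688111116293610821126543142160426617079940511630006820862697466582575257349116925728488930366609138264019883664906661504235885380294353134295748489096855100647154935187045898006656778240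

def natLog (x : Nat) : Nat := (LOGN >>> (8*x)) &&& 255
def natExp (i : Nat) : Nat := (EXPN >>> (8*i)) &&& 255

def natB (x y : Nat) : Nat :=
  if x = 0 ∨ y = 0 then 0 else natExp ((natLog x + natLog y) % 255)

lemma intLoop_comm (n : Nat) (s : Int × Int × Int) :
    intLoop n (intStep s) = intStep (intLoop n s) := by
  induction n generalizing s with
  | zero => rfl
  | succ n ih => exact ih (intStep s)

lemma foldA (n : Nat) (s : Int × Int × Int) :
    (List.range n).foldl
      (fun (s : Int × Int × Int) _ =>
        let result := s.1
        let a := s.2.1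
        let b := s.2.2
        let result := if PySem.Int.band b 1 ≠ 0 then PySem.Int.bxor result a else result
        let high_bit_set := PySem.Int.band a 128
        let a := a <<< (1:Nat)
        let a := if high_bit_set ≠ 0 then PySem.Int.bxor a 27 else a
        (result, a, b >>> (1:Nat))) s = intLoop n s := by
  induction n with
  | zero => rfl
  | succ n ih =>
    rw [List.range_succ, List.foldl_append, ih]
    show intStep (intLoop n s) = intLoop (n+1) s
    exact (intLoop_comm n s).symm

lemma xtime_eq_natR (a b : Int) : Xtime a b = ((natR (byte a) (byte b) : Nat) : Int) := by
  show PySem.Int.band ((List.range 8).foldl _ (0, a, b)).1 255 = _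
  rw [foldA 8 (0, a, b), band255]
  have h := loop_rel 8 0 a b
  have hb : ((b % ((2:Int)^8)).toNat) = byte b := by
    unfold byte; norm_num
  have hr : byte (0:Int) = 0 := by unfold byte; decide
  rw [hr, hb] at h
  rw [h]
  rfl

set_option maxRecDepth 10000 in
lemma f_log : ∀ x : Fin 256, PySem.List.pyGetD gfTables.2 (x.val : Int) 0 = ((natLog x.val : Nat) : Int) := by
  decide

set_option maxRecDepth 10000 in
lemma f_exp : ∀ i : Fin 255, PySem.List.pyGetD gfTables.1 (i.val : Int) 0 = ((natExp i.val : Nat) : Int) := by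
  decide

lemma xtime_alt_eq_natB (a b : Int) : Xtime_alt a b = ((natB (byte a) (byte b) : Nat) : Int) := by
  unfold Xtime_alt natB
  rw [band255 a, band255 b]
  by_cases hc : byte a = 0 ∨ byte b = 0
  · rw [if_pos (by exact_mod_cast hc), if_pos hc]
    rfl
  · rw [if_neg (by exact_mod_cast hc), if_neg hc]
    rw [f_log ⟨byte a, byte_lt a⟩, f_log ⟨byte b, byte_lt b⟩]
    rw [show ((natLog (byte a) : Nat) : Int) + ((natLog (byte b) : Nat) : Int)
          = (((natLog (byte a) + natLog (byte b) : Nat)) : Int) by push_cast; ring]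
    rw [show (255:Int) = ((255:Nat):Int) from rfl, PySem.Int.mod_natCast]
    exact f_exp ⟨(natLog (byte a) + natLog (byte b)) % 255, Nat.mod_lt _ (by norm_num)⟩


set_option maxRecDepth 100000 in
set_option maxHeartbeats 8000000 in
lemma gridBool : ((List.range 256).all fun x => (List.range 256).all fun y => natR x y == natB x y) = true := by rfl

lemma grid (x y : Nat) (hx : x < 256) (hy : y < 256) : natR x y = natB x y := by
  have h := gridBool
  rw [List.all_eq_true] at h
  have hx' := h x (List.mem_range.mpr hx)
  rw [List.all_eq_true] at hx'
  exact eq_of_beq (hx' y (List.mem_range.mpr hy))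

theorem xtime_agrees (a b : Int) : Xtime a b = Xtime_alt a b := by
  rw [xtime_eq_natR, xtime_alt_eq_natB, grid (byte a) (byte b) (byte_lt a) (byte_lt b)]

-- ===== VERDICT (by name: the statement is the Claim_ definition above) =====
theorem Xtime_spec : Claim_equal_Xtime := by
  intro a b _
  unfold Spec_Xtime
  exact xtime_agrees a b
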